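-- pv_equiv track=rewrite | github.com/deng-cy/deep_learning_topology_opt | fluid_fine/utils.py | existpath
-- ===== SOURCE A (Python) =====
-- from collections import defaultdict
--
-- class Graph:
--     def __init__(self):
--         self.graph = defaultdict(list)
--
--         # add edge to graph
--
--     def addEdge(self, u, v):
--         self.graph[u].append(v)
--
--         # BFS function to find path from source to sink
--
--     def BFS(self, s, d):
--
--         # Base case
--         if s == d:
--             return True
--
--         # Mark all the vertices as not visited
--         visited = defaultdict(lambda: False)
--
--         # Create a queue for BFS
--         queue = []
--         queue.append(s)
--
--         # Mark the current node as visited and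
--         # enqueue it
--         visited[s] = True
--         while (queue):
--
--             # Dequeue a vertex from queue
--             s = queue.pop(0)
--
--             # Get all adjacent vertices of the
--             # dequeued vertex s. If a adjacent has
--             # not been visited, then mark it visited
--             # and enqueue it
--             for i in self.graph[s]:
--
--                 # If this adjacent node is the destination
--                 # node, then return true
--                 if i == d:
--                     return True
--
--                 # Else, continue to do BFS
--                 if visited[i] == False:
--                     queue.append(i)
--                     visited[i] = True
--
--         # If BFS is complete without visiting d
--         return False
--
-- def isSafe(i, j, nrow, ncol):
--     if i >= 0 and i < nrow and j >= 0 and j < ncol: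
--         return True
--     else:
--         return False
--
-- def existpath(X):
--     s, d = None, None  # source and destination
--     ny = len(X)
--     nx = len(X[0])
--     g = Graph()
--
--     # each cell consider as node
--     k = 0  # Number of current vertex
--     for i in range(ny):
--         for j in range(nx):
--             if (X[i][j] != 1):
--
--                 # connect all 4 adjacent cell to
--                 # current cell
--                 if (isSafe(i, j + 1, ny, nx)):
--                     g.addEdge(k, k + 1)
--                 if (isSafe(i, j - 1, ny, nx)):
--                     g.addEdge(k, k - 1)
--                 if (isSafe(i + 1, j, ny, nx)):
--                     g.addEdge(k, k + nx)
--                 if (isSafe(i - 1, j, ny, nx)):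
--                     g.addEdge(k, k - nx)
--
--             if (X[i][j] == 2):
--                 s = k
--
--             if (X[i][j] == 3):
--                 d = k
--             k += 1
--
--     # find path Using BFS
--     return g.BFS(s, d)
-- ===== SOURCE B (Python) =====
-- from collections import deque
--
-- def existpath(X):
--     ny = len(X)
--     nx = len(X[0])
--     s = d = None
--     for i in range(ny):
--         for j in range(nx):
--             if X[i][j] == 2:
--                 s = (i, j)
--             if X[i][j] == 3:
--                 d = (i, j)
--     if s == d:
--         return True
--     if s is None or d is None:
--         return False
--     queue = deque([s])
--     visited = {s}
--     while queue:
--         i, j = queue.popleft()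
--         for v in ((i, j + 1), (i, j - 1), (i + 1, j), (i - 1, j)):
--             vi, vj = v
--             if 0 <= vi < ny and 0 <= vj < nx:
--                 if v == d:
--                     return True
--                 if X[vi][vj] != 1 and v not in visited:
--                     queue.append(v)
--                     visited.add(v)
--     return False
-- ===== Notes on version B (the rewrite author's own statement) =====
-- stated objective: faster
-- what changed: B drops A's explicit graph construction (defaultdict adjacency over integer node ids) and its O(n) list.pop(0) queue, and instead BFS-es directly on grid coordinates with a deque and a visited set, skipping wall cells at neighbour generation.
import Mathlib
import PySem

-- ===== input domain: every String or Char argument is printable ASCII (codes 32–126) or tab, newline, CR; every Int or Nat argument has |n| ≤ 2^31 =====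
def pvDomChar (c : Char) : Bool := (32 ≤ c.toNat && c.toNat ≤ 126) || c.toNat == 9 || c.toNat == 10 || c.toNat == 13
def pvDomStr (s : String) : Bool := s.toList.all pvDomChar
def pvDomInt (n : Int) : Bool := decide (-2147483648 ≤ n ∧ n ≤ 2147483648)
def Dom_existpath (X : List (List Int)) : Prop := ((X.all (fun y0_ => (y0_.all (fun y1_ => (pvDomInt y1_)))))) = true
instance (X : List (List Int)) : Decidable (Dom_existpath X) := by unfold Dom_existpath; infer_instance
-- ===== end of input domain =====

-- B replaces A's node-numbered adjacency-dict + O(n) list.pop(0) BFS by a direct BFS on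
-- grid coordinates with a deque and a visited set (no graph is built); objective: faster.

-- X[i][j] (total form: indices are always in range on the inputs the claim covers)
def cellXij (X : List (List Int)) (i j : Int) : Int :=
  (PySem.List.pyGet? ((PySem.List.pyGet? X i).getD []) j).getD 0

-- ===== PORT A =====
def pyIsSafe (i j nrow ncol : Int) : Bool :=
  if 0 ≤ i ∧ i < nrow ∧ 0 ≤ j ∧ j < ncol then true else false

-- self.graph[u].append(v) on a defaultdict(list)
def pyAddEdge (g : PySem.Dict Int (List Int)) (u v : Int) : PySem.Dict Int (List Int) :=
  g.modify u [] (fun l => l ++ [v])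

-- body of the double loop of existpath: state (g, s, d, k)
def buildCell (X : List (List Int)) (ny nx : Int)
    (st : PySem.Dict Int (List Int) × Option Int × Option Int × Int) (i j : Int) :
    PySem.Dict Int (List Int) × Option Int × Option Int × Int :=
  let (g, s, d, k) := st
  let x := cellXij X i j
  let g :=
    if x ≠ 1 then
      let g := if pyIsSafe i (j+1) ny nx then pyAddEdge g k (k+1) else g
      let g := if pyIsSafe i (j-1) ny nx then pyAddEdge g k (k-1) else g
      let g := if pyIsSafe (i+1) j ny nx then pyAddEdge g k (k+nx) else g
      let g := if pyIsSafe (i-1) j ny nx then pyAddEdge g k (k-nx) else g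
      g
    else g
  let s := if x = 2 then some k else s
  let d := if x = 3 then some k else d
  (g, s, d, k + 1)

def buildGrid (X : List (List Int)) (ny nx : Int) :
    PySem.Dict Int (List Int) × Option Int × Option Int × Int :=
  (PySem.List.pyRange 0 ny 1).foldl
    (fun st i => (PySem.List.pyRange 0 nx 1).foldl (fun st j => buildCell X ny nx st i j) st)
    (PySem.Dict.empty, none, none, 0)

-- self.graph[s]: the dict's keys are ints; s may be None (then the defaultdict default [])
def graphNbrs (g : PySem.Dict Int (List Int)) : Option Int → List (Option Int)
  | none => []
  | some k => (g.getD k []).map some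

-- the 'for i in self.graph[s]' loop: None = returned True, some = updated (queue, visited)
def bfsInnerA (d : Option Int) :
    List (Option Int) → List (Option Int) → PySem.Dict (Option Int) Bool →
    Option (List (Option Int) × PySem.Dict (Option Int) Bool)
  | [], q, vis => some (q, vis)
  | i :: rest, q, vis =>
      if i = d then none
      else if vis.getD i false = false then
        bfsInnerA d rest (q ++ [i]) (vis.insert i true)
      else bfsInnerA d rest q vis

-- the 'while queue' loop; fuel only makes the recursion structural (proven sufficient below)
def bfsLoopA (g : PySem.Dict Int (List Int)) (d : Option Int) :
    Nat → List (Option Int) → PySem.Dict (Option Int) Bool → Bool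
  | 0, _, _ => false
  | _+1, [], _ => false
  | fuel+1, u :: qs, vis =>
      match bfsInnerA d (graphNbrs g u) qs vis with
      | none => true
      | some (q', vis') => bfsLoopA g d fuel q' vis'

-- Graph.BFS(s, d)
def bfsA (g : PySem.Dict Int (List Int)) (s d : Option Int) (fuel : Nat) : Bool :=
  if s = d then true
  else bfsLoopA g d fuel [s] ((PySem.Dict.empty).insert s true)

def existpath (X : List (List Int)) : Bool :=
  let ny : Int := PySem.List.len X
  let nx : Int := PySem.List.len ((PySem.List.pyGet? X 0).getD [])  -- len(X[0]); X = [] raises, excluded by Pre_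
  match buildGrid X ny nx with
  | (g, s, d, _) => bfsA g s d (X.length * ((PySem.List.pyGet? X 0).getD []).length + 2)

-- ===== PORT B =====
-- single scan recording the source (2) and destination (3) coordinates
def scanB (X : List (List Int)) (ny nx : Int) : Option (Int × Int) × Option (Int × Int) :=
  (PySem.List.pyRange 0 ny 1).foldl
    (fun st i => (PySem.List.pyRange 0 nx 1).foldl
      (fun st j =>
        let (s, d) := st
        let x := cellXij X i j
        ((if x = 2 then some (i, j) else s), (if x = 3 then some (i, j) else d))) st)
    (none, none)

-- the 'for v in neighbours' loop of B: None = returned True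
def bfsInnerB (X : List (List Int)) (ny nx : Int) (d : Int × Int) :
    List (Int × Int) → List (Int × Int) → PySem.Set (Int × Int) →
    Option (List (Int × Int) × PySem.Set (Int × Int))
  | [], q, vis => some (q, vis)
  | v :: rest, q, vis =>
      if 0 ≤ v.1 ∧ v.1 < ny ∧ 0 ≤ v.2 ∧ v.2 < nx then
        if v = d then none
        else if cellXij X v.1 v.2 ≠ 1 ∧ v ∉ vis then
          bfsInnerB X ny nx d rest (q ++ [v]) (PySem.Set.add vis v)
        else bfsInnerB X ny nx d rest q vis
      else bfsInnerB X ny nx d rest q vis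

-- the 'while queue' loop of B; fuel only makes the recursion structural (proven sufficient below)
def bfsLoopB (X : List (List Int)) (ny nx : Int) (d : Int × Int) :
    Nat → List (Int × Int) → PySem.Set (Int × Int) → Bool
  | 0, _, _ => false
  | _+1, [], _ => false
  | fuel+1, u :: qs, vis =>
      match bfsInnerB X ny nx d [(u.1, u.2+1), (u.1, u.2-1), (u.1+1, u.2), (u.1-1, u.2)] qs vis with
      | none => true
      | some (q', vis') => bfsLoopB X ny nx d fuel q' vis'

def existpath_alt (X : List (List Int)) : Bool :=
  let ny : Int := PySem.List.len X
  let nx : Int := PySem.List.len ((PySem.List.pyGet? X 0).getD [])  -- len(X[0]); X = [] raises, excluded by Pre_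
  match scanB X ny nx with
  | (s, d) =>
    if s = d then true
    else
      match s, d with
      | some s, some d =>
          bfsLoopB X ny nx d (X.length * ((PySem.List.pyGet? X 0).getD []).length + 2)
            [s] (PySem.Set.add PySem.Set.empty s)
      | _, _ => false

-- ===== PRECONDITION & SPEC =====
-- Pre_ excludes exactly the inputs on which the Python A raises IndexError: the empty grid
-- (len(X[0])) and grids whose later rows are shorter than row 0 (X[i][j] for j < len(X[0])).
def Pre_existpath (X : List (List Int)) : Prop :=
  X ≠ [] ∧ ∀ r ∈ X, (X.headD []).length ≤ r.length
instance (X : List (List Int)) : Decidable (Pre_existpath X) := by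
  unfold Pre_existpath; infer_instance

def pvWitness_existpath : List (List Int) := [[2, 0], [1, 3]]

def Spec_existpath (X : List (List Int)) (out : Bool) : Prop := out = existpath_alt X
instance (X : List (List Int)) (out : Bool) : Decidable (Spec_existpath X out) := by
  unfold Spec_existpath; infer_instance

-- ===== CLAIM (what is proved, stated in full; the proofs are below) =====
def Claim_equal_existpath : Prop :=
  ∀ (X : List (List Int)), Dom_existpath X → Pre_existpath X → Spec_existpath X (existpath X)

-- ===== LEMMAS AND PROOFS =====

-- generic worklist with early exit, abstract visited container
def GInner {V W : Type} [DecidableEq V] (memf : W → V → Bool) (addf : W → V → W)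
    (keep : V → Bool) (dst : V) : List V → List V → W → Option (List V × W)
  | [], q, vis => some (q, vis)
  | w :: ws, q, vis =>
      if w = dst then none
      else if (keep w && !(memf vis w)) = true then
        GInner memf addf keep dst ws (q ++ [w]) (addf vis w)
      else GInner memf addf keep dst ws q vis

def GBFS {V W : Type} [DecidableEq V] (memf : W → V → Bool) (addf : W → V → W)
    (keep : V → Bool) (dst : V) (nbr : V → List V) : Nat → List V → W → Bool
  | 0, _, _ => false
  | _+1, [], _ => false
  | fuel+1, u :: qs, vis =>
      match GInner memf addf keep dst (nbr u) qs vis with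
      | none => true
      | some (q', vis') => GBFS memf addf keep dst nbr fuel q' vis'

theorem GInner_none_iff {V W : Type} [DecidableEq V] (memf : W → V → Bool) (addf : W → V → W)
    (keep : V → Bool) (dst : V) :
    ∀ (ns q : List V) (vis : W), GInner memf addf keep dst ns q vis = none ↔ dst ∈ ns := by
  intro ns
  induction ns with
  | nil => intro q vis; simp [GInner]
  | cons w ws ih =>
      intro q vis
      by_cases h : w = dst
      · subst h; simp [GInner]
      · simp only [GInner, if_neg h]
        split
        · rw [ih]; simp [List.mem_cons, Ne.symm h]
        · rw [ih]; simp [List.mem_cons, Ne.symm h]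

theorem GInner_some {V W : Type} [DecidableEq V] (memf : W → V → Bool) (addf : W → V → W)
    (keep : V → Bool) (dst : V)
    (hma : ∀ (s : W) (v w : V), memf (addf s v) w = (decide (w = v) || memf s w)) :
    ∀ (ns q : List V) (vis : W), dst ∉ ns →
      ∃ (new : List V) (vis' : W),
        GInner memf addf keep dst ns q vis = some (q ++ new, vis') ∧
        (∀ v, memf vis' v = true ↔ (memf vis v = true ∨ v ∈ new)) ∧
        new.Nodup ∧
        (∀ v ∈ new, v ∈ ns ∧ keep v = true ∧ memf vis v = false) ∧
        (∀ z ∈ ns, keep z = true → memf vis' z = true) := by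
  intro ns
  induction ns with
  | nil =>
      intro q vis _
      exact ⟨[], vis, by simp [GInner], by simp, by simp, by simp, by simp⟩
  | cons w ws ih =>
      intro q vis hdst
      have hwd : w ≠ dst := fun h => hdst (h ▸ List.mem_cons_self ..)
      have hdst' : dst ∉ ws := fun h => hdst (List.mem_cons_of_mem _ h)
      by_cases hc : (keep w && !(memf vis w)) = true
      · obtain ⟨new, vis', heq, hmem, hnd, hprops, hclose⟩ := ih (q ++ [w]) (addf vis w) hdst'
        refine ⟨w :: new, vis', ?_, ?_, ?_, ?_, ?_⟩
        · simp only [GInner, if_neg hwd, if_pos hc, heq, List.append_assoc, List.singleton_append]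
        · intro v
          rw [hmem v, hma]
          simp only [Bool.or_eq_true, decide_eq_true_eq, List.mem_cons]
          tauto
        · refine List.nodup_cons.mpr ⟨fun hw => ?_, hnd⟩
          have := (hprops w hw).2.2
          rw [hma] at this; simp at this
        · intro v hv
          rcases List.mem_cons.mp hv with rfl | hv
          · simp only [Bool.and_eq_true, Bool.not_eq_true'] at hc
            exact ⟨List.mem_cons_self .., hc.1, hc.2⟩
          · obtain ⟨h1, h2, h3⟩ := hprops v hv
            rw [hma] at h3
            simp only [Bool.or_eq_false_iff, decide_eq_false_iff_not] at h3
            exact ⟨List.mem_cons_of_mem _ h1, h2, h3.2⟩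
        · intro z hz hk
          rcases List.mem_cons.mp hz with rfl | hz
          · rw [hmem z, hma]; left; simp
          · exact hclose z hz hk
      · obtain ⟨new, vis', heq, hmem, hnd, hprops, hclose⟩ := ih q vis hdst'
        refine ⟨new, vis', ?_, hmem, hnd, ?_, ?_⟩
        · simp only [GInner, if_neg hwd, if_neg hc, heq]
        · intro v hv
          obtain ⟨h1, h2, h3⟩ := hprops v hv
          exact ⟨List.mem_cons_of_mem _ h1, h2, h3⟩
        · intro z hz hk
          rcases List.mem_cons.mp hz with rfl | hz
          · simp only [Bool.and_eq_true, Bool.not_eq_true'] at hc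
            have : memf vis z = true := by
              rcases Bool.eq_false_or_eq_true (memf vis z) with h | h
              · exact h
              · exact absurd ⟨hk, h⟩ hc
            rw [hmem z]; exact Or.inl this
          · exact hclose z hz hk

theorem GBFS_escape {V W : Type} [DecidableEq V] (memf : W → V → Bool)
    (keep : V → Bool) (dst : V) (nbr : V → List V) (q : List V) (vis : W)
    (hinv : ∀ v, memf vis v = true → v ∉ q →
        dst ∉ nbr v ∧ ∀ z ∈ nbr v, keep z = true → memf vis z = true) :
    ∀ w t, memf vis w = true →
      Relation.ReflTransGen (fun a b => b ∈ nbr a ∧ keep b = true) w t → dst ∈ nbr t →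
      ∃ x ∈ q, ∃ u, Relation.ReflTransGen (fun a b => b ∈ nbr a ∧ keep b = true) x u ∧ dst ∈ nbr u := by
  intro w t hw hreach
  induction hreach using Relation.ReflTransGen.head_induction_on with
  | refl =>
      intro hdt
      by_cases hq : t ∈ q
      · exact ⟨t, hq, t, Relation.ReflTransGen.refl, hdt⟩
      · exact absurd hdt (hinv t hw hq).1
  | head hstep htail ih =>
      rename_i a b
      intro hdt
      by_cases hq : a ∈ q
      · exact ⟨a, hq, _, Relation.ReflTransGen.head hstep htail, hdt⟩
      · have hb : memf vis b = true := (hinv a hw hq).2 b hstep.1 hstep.2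
        exact ih hb hdt

theorem GBFS_iff {V W : Type} [DecidableEq V] (memf : W → V → Bool) (addf : W → V → W)
    (keep : V → Bool) (dst : V) (nbr : V → List V)
    (hma : ∀ (s : W) (v w : V), memf (addf s v) w = (decide (w = v) || memf s w))
    (Univ : Finset V) (hU : ∀ u v, v ∈ nbr u → keep v = true → v ∈ Univ) :
    ∀ (fuel : Nat) (q : List V) (vis : W) (S : Finset V),
      (∀ v, memf vis v = true ↔ v ∈ S) →
      q.length + (Univ \ S).card ≤ fuel →
      (∀ v, memf vis v = true → v ∉ q →
          dst ∉ nbr v ∧ ∀ z ∈ nbr v, keep z = true → memf vis z = true) →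
      (∀ v ∈ q, memf vis v = true) →
      (GBFS memf addf keep dst nbr fuel q vis = true ↔
        ∃ x ∈ q, ∃ u, Relation.ReflTransGen (fun a b => b ∈ nbr a ∧ keep b = true) x u ∧ dst ∈ nbr u) := by
  intro fuel
  induction fuel with
  | zero =>
      intro q vis S hmem hfuel hinv hq
      have : q = [] := List.eq_nil_of_length_eq_zero (by omega)
      subst this
      simp [GBFS]
  | succ fuel ih =>
      intro q vis S hmem hfuel hinv hq
      match q with
      | [] => simp [GBFS]
      | u :: qs =>
        cases hin : GInner memf addf keep dst (nbr u) qs vis with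
        | none =>
            have hd : dst ∈ nbr u := (GInner_none_iff memf addf keep dst (nbr u) qs vis).mp hin
            simp only [GBFS, hin]
            constructor
            · intro _
              exact ⟨u, List.mem_cons_self .., u, Relation.ReflTransGen.refl, hd⟩
            · intro _; trivial
        | some p =>
            have hdst : dst ∉ nbr u := by
              intro hd
              rw [(GInner_none_iff memf addf keep dst (nbr u) qs vis).mpr hd] at hin
              simp at hin
            obtain ⟨new, vis', heq, hmem', hnd, hprops, hclose⟩ :=
              GInner_some memf addf keep dst hma (nbr u) qs vis hdst
            rw [heq] at hin
            obtain rfl : p = (qs ++ new, vis') := by injection hin.symm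
            simp only [GBFS, heq]
            -- new state facts
            have hvisu : memf vis u = true := hq u (List.mem_cons_self ..)
            have hmono : ∀ v, memf vis v = true → memf vis' v = true := by
              intro v h; exact (hmem' v).mpr (Or.inl h)
            have hnewsub : ∀ v ∈ new, v ∈ Univ := by
              intro v hv
              obtain ⟨h1, h2, _⟩ := hprops v hv
              exact hU u v h1 h2
            have hnewS : ∀ v ∈ new, v ∉ S := by
              intro v hv hS
              have := (hmem v).mpr hS
              rw [(hprops v hv).2.2] at this; exact Bool.noConfusion this
            have hmemS' : ∀ v, memf vis' v = true ↔ v ∈ S ∪ new.toFinset := by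
              intro v
              rw [hmem' v, hmem v]
              simp [Finset.mem_union, List.mem_toFinset]
            have hTcard : new.toFinset.card = new.length := List.toFinset_card_of_nodup hnd
            have hsub : new.toFinset ⊆ Univ \ S := by
              intro v hv
              rw [List.mem_toFinset] at hv
              exact Finset.mem_sdiff.mpr ⟨hnewsub v hv, hnewS v hv⟩
            have hsplit : Univ \ (S ∪ new.toFinset) = (Univ \ S) \ new.toFinset := by
              ext x; simp only [Finset.mem_sdiff, Finset.mem_union]; tauto
            have hfuel' : (qs ++ new).length + (Univ \ (S ∪ new.toFinset)).card ≤ fuel := by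
              rw [hsplit, Finset.card_sdiff, Finset.inter_eq_left.mpr hsub, hTcard]
              have hle : new.length ≤ (Univ \ S).card := hTcard ▸ Finset.card_le_card hsub
              simp only [List.length_append, List.length_cons] at hfuel ⊢
              omega
            have hinv' : ∀ v, memf vis' v = true → v ∉ qs ++ new →
                dst ∉ nbr v ∧ ∀ z ∈ nbr v, keep z = true → memf vis' z = true := by
              intro v hv hvq
              rcases (hmem' v).mp hv with hvold | hvnew
              · by_cases hvu : v = u
                · subst hvu
                  exact ⟨hdst, hclose⟩
                · have hvnotq : v ∉ u :: qs := by
                    intro h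
                    rcases List.mem_cons.mp h with h | h
                    · exact hvu h
                    · exact hvq (List.mem_append.mpr (Or.inl h))
                  obtain ⟨h1, h2⟩ := hinv v hvold hvnotq
                  exact ⟨h1, fun z hz hk => hmono z (h2 z hz hk)⟩
              · exact absurd (List.mem_append.mpr (Or.inr hvnew)) hvq
            have hq' : ∀ v ∈ qs ++ new, memf vis' v = true := by
              intro v hv
              rcases List.mem_append.mp hv with h | h
              · exact hmono v (hq v (List.mem_cons_of_mem _ h))
              · exact (hmem' v).mpr (Or.inr h)
            rw [ih (qs ++ new) vis' (S ∪ new.toFinset) hmemS' hfuel' hinv' hq']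
            constructor
            · -- RHS(qs ++ new) → RHS(u :: qs)
              rintro ⟨x, hx, t, hreach, hdt⟩
              rcases List.mem_append.mp hx with h | h
              · exact ⟨x, List.mem_cons_of_mem _ h, t, hreach, hdt⟩
              · obtain ⟨h1, h2, _⟩ := hprops x h
                exact ⟨u, List.mem_cons_self .., t, Relation.ReflTransGen.head ⟨h1, h2⟩ hreach, hdt⟩
            · -- RHS(u :: qs) → RHS(qs ++ new)
              rintro ⟨x, hx, t, hreach, hdt⟩
              rcases List.mem_cons.mp hx with rfl | h
              · exact GBFS_escape memf keep dst nbr (qs ++ new) vis' hinv' x t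
                  (hmono x hvisu) hreach hdt
              · exact ⟨x, List.mem_append.mpr (Or.inl h), t, hreach, hdt⟩

def memfA (vis : PySem.Dict (Option Int) Bool) (v : Option Int) : Bool := vis.getD v false
def addfA (vis : PySem.Dict (Option Int) Bool) (v : Option Int) : PySem.Dict (Option Int) Bool :=
  vis.insert v true

theorem hmaA : ∀ (s : PySem.Dict (Option Int) Bool) (v w : Option Int),
    memfA (addfA s v) w = (decide (w = v) || memfA s w) := by
  intro s v w
  by_cases h : w = v <;> simp [memfA, addfA, PySem.Dict.getD_insert, h]

theorem bfsInnerA_eq (d : Option Int) :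
    ∀ (ns q : List (Option Int)) (vis : PySem.Dict (Option Int) Bool),
    bfsInnerA d ns q vis = GInner memfA addfA (fun _ => true) d ns q vis := by
  intro ns
  induction ns with
  | nil => intro q vis; rfl
  | cons w ws ih =>
      intro q vis
      by_cases h : w = d
      · simp [bfsInnerA, GInner, h]
      · cases hv : vis.getD w false <;>
          simp [bfsInnerA, GInner, h, hv, memfA, addfA, ih]

theorem bfsLoopA_eq (g : PySem.Dict Int (List Int)) (d : Option Int) :
    ∀ (fuel : Nat) (q : List (Option Int)) (vis : PySem.Dict (Option Int) Bool),
    bfsLoopA g d fuel q vis = GBFS memfA addfA (fun _ => true) d (graphNbrs g) fuel q vis := by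
  intro fuel
  induction fuel with
  | zero => intro q vis; rfl
  | succ fuel ih =>
      intro q vis
      match q with
      | [] => rfl
      | u :: qs =>
          simp only [bfsLoopA, GBFS, bfsInnerA_eq d]
          cases GInner memfA addfA (fun _ => true) d (graphNbrs g u) qs vis with
          | none => rfl
          | some p => exact ih p.1 p.2

def memfB (vis : PySem.Set (Int × Int)) (v : Int × Int) : Bool := decide (v ∈ vis)
def keepB (X : List (List Int)) (v : Int × Int) : Bool := decide (cellXij X v.1 v.2 ≠ 1)

theorem hmaB : ∀ (s : PySem.Set (Int × Int)) (v w : Int × Int),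
    memfB (PySem.Set.add s v) w = (decide (w = v) || memfB s w) := by
  intro s v w
  by_cases h : w = v <;> by_cases h2 : w ∈ s <;>
    simp [memfB, PySem.Set.mem_add, h, h2]

theorem pyIsSafe_iff (i j a b : Int) :
    pyIsSafe i j a b = true ↔ (0 ≤ i ∧ i < a ∧ 0 ≤ j ∧ j < b) := by
  simp [pyIsSafe]

theorem bfsInnerB_eq (X : List (List Int)) (ny nx : Int) (d : Int × Int) :
    ∀ (cs q : List (Int × Int)) (vis : PySem.Set (Int × Int)),
    bfsInnerB X ny nx d cs q vis
      = GInner memfB PySem.Set.add (keepB X) d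
          (cs.filter (fun v => pyIsSafe v.1 v.2 ny nx)) q vis := by
  intro cs
  induction cs with
  | nil => intro q vis; rfl
  | cons w ws ih =>
      intro q vis
      by_cases hs : 0 ≤ w.1 ∧ w.1 < ny ∧ 0 ≤ w.2 ∧ w.2 < nx
      · have hf : pyIsSafe w.1 w.2 ny nx = true := (pyIsSafe_iff ..).mpr hs
        rw [show (w :: ws).filter (fun v => pyIsSafe v.1 v.2 ny nx)
              = w :: ws.filter (fun v => pyIsSafe v.1 v.2 ny nx) by
            simp [hf]]
        by_cases hd : w = d
        · subst hd
          simp only [bfsInnerB, if_pos hs, GInner]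
          simp
        · by_cases hc : cellXij X w.1 w.2 ≠ 1 ∧ w ∉ vis
          · have hck : (keepB X w && !(memfB vis w)) = true := by
              simp [keepB, memfB, hc.1, hc.2]
            simp only [bfsInnerB, if_pos hs, if_neg hd, if_pos hc, GInner, if_pos hck, ih]
          · have : ¬ ((keepB X w && !(memfB vis w)) = true) := by
              simp only [keepB, memfB, Bool.and_eq_true, Bool.not_eq_true', decide_eq_true_eq,
                decide_eq_false_iff_not]
              intro ⟨a, b⟩; exact hc ⟨a, b⟩
            simp only [bfsInnerB, if_pos hs, if_neg hc, GInner, if_neg hd,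
              if_neg this, ih]
      · have hf : ¬ (pyIsSafe w.1 w.2 ny nx = true) := fun h => hs ((pyIsSafe_iff ..).mp h)
        rw [show (w :: ws).filter (fun v => pyIsSafe v.1 v.2 ny nx)
              = ws.filter (fun v => pyIsSafe v.1 v.2 ny nx) by
            simp [Bool.eq_false_iff.mpr hf]]
        simp only [bfsInnerB, if_neg hs, ih]

def candsOf (v : Int × Int) : List (Int × Int) :=
  [(v.1, v.2+1), (v.1, v.2-1), (v.1+1, v.2), (v.1-1, v.2)]

def nbrB (_X : List (List Int)) (ny nx : Int) (v : Int × Int) : List (Int × Int) :=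
  (candsOf v).filter (fun w => pyIsSafe w.1 w.2 ny nx)

theorem bfsLoopB_eq (X : List (List Int)) (ny nx : Int) (d : Int × Int) :
    ∀ (fuel : Nat) (q : List (Int × Int)) (vis : PySem.Set (Int × Int)),
    bfsLoopB X ny nx d fuel q vis
      = GBFS memfB PySem.Set.add (keepB X) d (nbrB X ny nx) fuel q vis := by
  intro fuel
  induction fuel with
  | zero => intro q vis; rfl
  | succ fuel ih =>
      intro q vis
      match q with
      | [] => rfl
      | u :: qs =>
          simp only [bfsLoopB, GBFS, bfsInnerB_eq X ny nx d]
          show (match GInner memfB PySem.Set.add (keepB X) d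
              (([(u.1, u.2+1), (u.1, u.2-1), (u.1+1, u.2), (u.1-1, u.2)] : List (Int × Int)).filter
                (fun v => pyIsSafe v.1 v.2 ny nx)) qs vis with
            | none => true
            | some (q', vis') => bfsLoopB X ny nx d fuel q' vis') = _
          rw [show (([(u.1, u.2+1), (u.1, u.2-1), (u.1+1, u.2), (u.1-1, u.2)] : List (Int × Int)).filter
                (fun v => pyIsSafe v.1 v.2 ny nx)) = nbrB X ny nx u from rfl]
          cases GInner memfB PySem.Set.add (keepB X) d (nbrB X ny nx u) qs vis with
          | none => rfl
          | some p => exact ih p.1 p.2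

def cellOf (M : Nat) (c : Nat) : Int × Int := (((c / M : Nat) : Int), ((c % M : Nat) : Int))

def encP (M : Nat) (p : Int × Int) : Int := p.1 * (M : Int) + p.2

def lastWith (X : List (List Int)) (M : Nat) (v : Int) (c : Nat) : Option (Int × Int) :=
  (List.range c).foldl
    (fun a t => if cellXij X (cellOf M t).1 (cellOf M t).2 = v then some (cellOf M t) else a) none

theorem enc_cellOf (M : Nat) (c : Nat) : encP M (cellOf M c) = (c : Int) := by
  simp only [encP, cellOf]
  push_cast
  rw [mul_comm]
  exact_mod_cast Nat.div_add_mod c M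

theorem pyDoubleLoop {St : Type} (f : St → Int → Int → St) (N M : Nat) (init : St) :
    (PySem.List.pyRange 0 (N : Int) 1).foldl
      (fun st i => (PySem.List.pyRange 0 (M : Int) 1).foldl (fun st j => f st i j) st) init
    = (List.range (N * M)).foldl (fun st c => f st (cellOf M c).1 (cellOf M c).2) init := by
  simp only [PySem.List.pyRange_zero_natCast, List.foldl_map]
  induction N generalizing init with
  | zero => simp
  | succ N ih =>
      rw [List.range_succ, List.foldl_append, ih, Nat.succ_mul, List.range_add,
        List.foldl_append, List.foldl_map]
      simp only [List.foldl_cons, List.foldl_nil]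
      apply PySem.List.foldl_congr_mem
      intro acc x hx
      have hxM : x < M := List.mem_range.mp hx
      have hM : 0 < M := by omega
      have hdiv : (N * M + x) / M = N := by
        rw [Nat.add_comm, Nat.mul_comm, Nat.add_mul_div_left _ _ hM, Nat.div_eq_of_lt hxM]
        omega
      have hmod : (N * M + x) % M = x := by
        rw [Nat.add_comm, Nat.add_mul_mod_self_right]
        exact Nat.mod_eq_of_lt hxM
      simp [cellOf, hdiv, hmod]

theorem scanB_char (X : List (List Int)) (N M : Nat) :
    scanB X (N : Int) (M : Int) = (lastWith X M 2 (N * M), lastWith X M 3 (N * M)) := by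
  show (PySem.List.pyRange 0 (N : Int) 1).foldl
      (fun st i => (PySem.List.pyRange 0 (M : Int) 1).foldl
        (fun st j =>
          ((if cellXij X i j = 2 then some (i, j) else st.1),
           (if cellXij X i j = 3 then some (i, j) else st.2))) st)
      (none, none) = _
  rw [pyDoubleLoop (fun st i j =>
    ((if cellXij X i j = 2 then some (i, j) else st.1),
     (if cellXij X i j = 3 then some (i, j) else st.2))) N M (none, none)]
  generalize N * M = c
  induction c with
  | zero => simp [lastWith]
  | succ c ih =>
      rw [List.range_succ, List.foldl_append, ih]
      simp only [List.foldl_cons, List.foldl_nil, lastWith, List.range_succ, List.foldl_append]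

theorem getD_condAdd_self (g : PySem.Dict Int (List Int)) (k v : Int) (b : Bool) :
    (if b = true then pyAddEdge g k v else g).getD k []
      = g.getD k [] ++ (if b = true then [v] else []) := by
  cases b <;> simp [pyAddEdge, PySem.Dict.getD_modify_self]

theorem getD_condAdd_ne (g : PySem.Dict Int (List Int)) (k v t : Int) (b : Bool) (h : t ≠ k) :
    (if b = true then pyAddEdge g k v else g).getD t [] = g.getD t [] := by
  cases b <;> simp [pyAddEdge, PySem.Dict.getD_modify_of_ne _ _ _ h]

theorem nbr_map_enc (X : List (List Int)) (ny : Int) (M : Nat) (p : Int × Int) :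
    (nbrB X ny (M : Int) p).map (encP M)
      = ((((if pyIsSafe p.1 (p.2+1) ny (M : Int) = true then [encP M p + 1] else [])
          ++ (if pyIsSafe p.1 (p.2-1) ny (M : Int) = true then [encP M p - 1] else []))
          ++ (if pyIsSafe (p.1+1) p.2 ny (M : Int) = true then [encP M p + (M : Int)] else []))
          ++ (if pyIsSafe (p.1-1) p.2 ny (M : Int) = true then [encP M p - (M : Int)] else [])) := by
  by_cases h1 : pyIsSafe p.1 (p.2+1) ny (M : Int) = true <;>
  by_cases h2 : pyIsSafe p.1 (p.2-1) ny (M : Int) = true <;>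
  by_cases h3 : pyIsSafe (p.1+1) p.2 ny (M : Int) = true <;>
  by_cases h4 : pyIsSafe (p.1-1) p.2 ny (M : Int) = true <;>
    simp [nbrB, candsOf, List.filter, h1, h2, h3, h4, encP] <;> ring_nf <;> simp

theorem build_prefix (X : List (List Int)) (N M : Nat) :
    ∀ c : Nat,
      ∃ G, (List.range c).foldl
            (fun st t => buildCell X (N : Int) (M : Int) st (cellOf M t).1 (cellOf M t).2)
            (PySem.Dict.empty, none, none, 0)
        = (G, (lastWith X M 2 c).map (encP M), (lastWith X M 3 c).map (encP M), (c : Int)) ∧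
        ∀ t : Int, G.getD t [] =
          (if 0 ≤ t ∧ t < (c : Int) ∧ cellXij X (cellOf M t.toNat).1 (cellOf M t.toNat).2 ≠ 1
           then (nbrB X (N : Int) (M : Int) (cellOf M t.toNat)).map (encP M)
           else []) := by
  intro c
  induction c with
  | zero =>
      refine ⟨PySem.Dict.empty, by simp [lastWith], ?_⟩
      intro t
      rw [if_neg (by omega)]
      simp [PySem.Dict.getD_empty]
  | succ c ih =>
      obtain ⟨G, hfold, hchar⟩ := ih
      set p := cellOf M c with hp
      set x := cellXij X p.1 p.2 with hx
      have henc : encP M p = (c : Int) := enc_cellOf M c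
      have htoNat : ((c : Int)).toNat = c := by omega
      -- the four conditional edge additions at key c
      set b1 := pyIsSafe p.1 (p.2+1) (N : Int) (M : Int) with hb1
      set b2 := pyIsSafe p.1 (p.2-1) (N : Int) (M : Int) with hb2
      set b3 := pyIsSafe (p.1+1) p.2 (N : Int) (M : Int) with hb3
      set b4 := pyIsSafe (p.1-1) p.2 (N : Int) (M : Int) with hb4
      set g1 := (if b1 = true then pyAddEdge G (c : Int) ((c : Int)+1) else G) with hg1
      set g2 := (if b2 = true then pyAddEdge g1 (c : Int) ((c : Int)-1) else g1) with hg2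
      set g3 := (if b3 = true then pyAddEdge g2 (c : Int) ((c : Int)+(M : Int)) else g2) with hg3
      set g4 := (if b4 = true then pyAddEdge g3 (c : Int) ((c : Int)-(M : Int)) else g3) with hg4
      set G' := (if x ≠ 1 then g4 else G) with hG'
      refine ⟨G', ?_, ?_⟩
      · rw [List.range_succ, List.foldl_append, hfold]
        simp only [List.foldl_cons, List.foldl_nil]
        show buildCell X (N : Int) (M : Int) _ p.1 p.2 = _
        rw [buildCell]
        simp only [← hx, ← hb1, ← hb2, ← hb3, ← hb4]
        have hlast2 : (lastWith X M 2 (c+1)).map (encP M)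
            = (if x = 2 then some (c : Int) else (lastWith X M 2 c).map (encP M)) := by
          rw [lastWith, List.range_succ, List.foldl_append]
          simp only [List.foldl_cons, List.foldl_nil]
          rw [← lastWith]
          by_cases h : x = 2
          · rw [if_pos h, if_pos h, Option.map_some, henc]
          · rw [if_neg h, if_neg h]
        have hlast3 : (lastWith X M 3 (c+1)).map (encP M)
            = (if x = 3 then some (c : Int) else (lastWith X M 3 c).map (encP M)) := by
          rw [lastWith, List.range_succ, List.foldl_append]
          simp only [List.foldl_cons, List.foldl_nil]
          rw [← lastWith]
          by_cases h : x = 3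
          · rw [if_pos h, if_pos h, Option.map_some, henc]
          · rw [if_neg h, if_neg h]
        rw [hlast2, hlast3]
        push_cast
        rfl
      · intro t
        by_cases ht : t = (c : Int)
        · subst ht
          have hold : G.getD (c : Int) [] = [] := by
            rw [hchar, if_neg (by omega)]
          by_cases hw : x ≠ 1
          · have hcond : (0 ≤ (c : Int) ∧ (c : Int) < ((c+1 : Nat) : Int) ∧
                cellXij X (cellOf M ((c : Int)).toNat).1 (cellOf M ((c : Int)).toNat).2 ≠ 1) := by
              refine ⟨by omega, by omega, ?_⟩
              rw [htoNat, ← hp, ← hx]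
              exact hw
            rw [hG', if_pos hw, hg4, getD_condAdd_self, hg3, getD_condAdd_self,
              hg2, getD_condAdd_self, hg1, getD_condAdd_self, hold, if_pos hcond,
              htoNat, ← hp, nbr_map_enc, henc]
            simp only [hb1, hb2, hb3, hb4, List.nil_append, List.append_assoc]
          · rw [hG', if_neg hw, hold, if_neg]
            rw [htoNat, ← hp, ← hx]
            intro ⟨_, _, hcontra⟩
            exact hw hcontra
        · have hunch : G'.getD t [] = G.getD t [] := by
            by_cases hw : x ≠ 1
            · rw [hG', if_pos hw, hg4, getD_condAdd_ne _ _ _ _ _ ht, hg3,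
                getD_condAdd_ne _ _ _ _ _ ht, hg2, getD_condAdd_ne _ _ _ _ _ ht,
                hg1, getD_condAdd_ne _ _ _ _ _ ht]
            · rw [hG', if_neg hw]
          rw [hunch, hchar]
          by_cases hcond : 0 ≤ t ∧ t < (c : Int)
              ∧ cellXij X (cellOf M t.toNat).1 (cellOf M t.toNat).2 ≠ 1
          · rw [if_pos hcond, if_pos ⟨hcond.1, by omega, hcond.2.2⟩]
          · rw [if_neg hcond, if_neg ?_]
            intro ⟨a, b, w⟩
            exact hcond ⟨a, by omega, w⟩

theorem build_char (X : List (List Int)) (N M : Nat) :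
    ∃ G, buildGrid X (N : Int) (M : Int)
        = (G, (lastWith X M 2 (N*M)).map (encP M), (lastWith X M 3 (N*M)).map (encP M),
            ((N*M : Nat) : Int)) ∧
      ∀ t : Int, G.getD t [] =
        (if 0 ≤ t ∧ t < ((N*M : Nat) : Int)
            ∧ cellXij X (cellOf M t.toNat).1 (cellOf M t.toNat).2 ≠ 1
         then (nbrB X (N : Int) (M : Int) (cellOf M t.toNat)).map (encP M)
         else []) := by
  obtain ⟨G, hfold, hchar⟩ := build_prefix X N M (N*M)
  refine ⟨G, ?_, hchar⟩
  rw [buildGrid, pyDoubleLoop (fun st i j => buildCell X (N : Int) (M : Int) st i j) N M]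
  exact hfold

-- the graph characterization produced by build_char, as a predicate
def gcharP (X : List (List Int)) (N M : Nat) (G : PySem.Dict Int (List Int)) : Prop :=
  ∀ t : Int, G.getD t [] =
    (if 0 ≤ t ∧ t < ((N*M : Nat) : Int)
        ∧ cellXij X (cellOf M t.toNat).1 (cellOf M t.toNat).2 ≠ 1
     then (nbrB X (N : Int) (M : Int) (cellOf M t.toNat)).map (encP M)
     else [])

theorem enc_bounds (N M : Nat) (p : Int × Int) (hv : pyIsSafe p.1 p.2 (N : Int) (M : Int) = true) :
    0 ≤ encP M p ∧ encP M p < ((N*M : Nat) : Int) := by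
  obtain ⟨h1, h2, h3, h4⟩ := (pyIsSafe_iff ..).mp hv
  constructor
  · have : 0 ≤ p.1 * (M : Int) := mul_nonneg h1 (by positivity)
    simp only [encP]; omega
  · have : (p.1 + 1) * (M : Int) ≤ (N : Int) * (M : Int) :=
      mul_le_mul_of_nonneg_right (by omega) (by positivity)
    simp only [encP]; push_cast; nlinarith

theorem cellOf_enc (M : Nat) (p : Int × Int) (h1 : 0 ≤ p.1) (h2 : 0 ≤ p.2)
    (h3 : p.2 < (M : Int)) : cellOf M ((encP M p).toNat) = p := by
  have hM : 0 < M := by omega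
  obtain ⟨a, ha⟩ := Int.eq_ofNat_of_zero_le h1
  obtain ⟨b, hb⟩ := Int.eq_ofNat_of_zero_le h2
  have hbM : b < M := by omega
  have henc : (encP M p).toNat = a * M + b := by
    simp only [encP, ha, hb]; omega
  have hdiv : (a * M + b) / M = a := by
    rw [Nat.add_comm, Nat.mul_comm, Nat.add_mul_div_left _ _ hM, Nat.div_eq_of_lt hbM]; omega
  have hmod : (a * M + b) % M = b := by
    rw [Nat.add_comm, Nat.add_mul_mod_self_right]; exact Nat.mod_eq_of_lt hbM
  rw [henc]
  simp only [cellOf, hdiv, hmod]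
  rw [Prod.ext_iff]
  exact ⟨by omega, by omega⟩

theorem encP_inj (N M : Nat) (p q : Int × Int)
    (hp : pyIsSafe p.1 p.2 (N : Int) (M : Int) = true)
    (hq : pyIsSafe q.1 q.2 (N : Int) (M : Int) = true)
    (h : encP M p = encP M q) : p = q := by
  obtain ⟨a1, a2, a3, a4⟩ := (pyIsSafe_iff ..).mp hp
  obtain ⟨b1, b2, b3, b4⟩ := (pyIsSafe_iff ..).mp hq
  rw [← cellOf_enc M p a1 a3 a4, ← cellOf_enc M q b1 b3 b4, h]

theorem cellOf_valid (N M : Nat) (c : Nat) (hc : c < N*M) :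
    pyIsSafe (cellOf M c).1 (cellOf M c).2 (N : Int) (M : Int) = true := by
  have hM : 0 < M := by
    rcases Nat.eq_zero_or_pos M with h | h
    · subst h; simp at hc
    · exact h
  rw [pyIsSafe_iff]
  have h1 : c / M < N := Nat.div_lt_of_lt_mul (by rwa [Nat.mul_comm])
  have h2 : c % M < M := Nat.mod_lt _ hM
  unfold cellOf
  refine ⟨by positivity, ?_, by positivity, ?_⟩
  · show ((c / M : Nat) : Int) < (N : Int)
    exact_mod_cast h1
  · show ((c % M : Nat) : Int) < (M : Int)
    exact_mod_cast h2

theorem mem_nbrB_valid (X : List (List Int)) (ny nx : Int) (p q : Int × Int)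
    (h : q ∈ nbrB X ny nx p) : pyIsSafe q.1 q.2 ny nx = true :=
  (List.mem_filter.mp h).2

theorem mem_graphNbrs_iff (X : List (List Int)) (N M : Nat) (G : PySem.Dict Int (List Int))
    (hchar : gcharP X N M G) (u w : Option Int) :
    w ∈ graphNbrs G u ↔
      ∃ p q, u = some (encP M p) ∧ w = some (encP M q)
        ∧ pyIsSafe p.1 p.2 (N : Int) (M : Int) = true
        ∧ cellXij X p.1 p.2 ≠ 1
        ∧ q ∈ nbrB X (N : Int) (M : Int) p := by
  constructor
  · intro hw
    match u with
    | none => simp [graphNbrs] at hw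
    | some k =>
        simp only [graphNbrs, List.mem_map] at hw
        obtain ⟨t, ht, rfl⟩ := hw
        rw [hchar k] at ht
        by_cases hcond : 0 ≤ k ∧ k < ((N*M : Nat) : Int)
            ∧ cellXij X (cellOf M k.toNat).1 (cellOf M k.toNat).2 ≠ 1
        · rw [if_pos hcond] at ht
          obtain ⟨q, hq, rfl⟩ := List.mem_map.mp ht
          refine ⟨cellOf M k.toNat, q, ?_, rfl, ?_, hcond.2.2, hq⟩
          · have : encP M (cellOf M k.toNat) = ((k.toNat : Nat) : Int) := enc_cellOf M k.toNat
            rw [this]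
            congr 1
            omega
          · exact cellOf_valid N M k.toNat (by omega)
        · rw [if_neg hcond] at ht
          simp at ht
  · rintro ⟨p, q, rfl, rfl, hv, hnw, hq⟩
    simp only [graphNbrs, List.mem_map]
    refine ⟨encP M q, ?_, rfl⟩
    rw [hchar]
    obtain ⟨hb1, hb2⟩ := enc_bounds N M p hv
    have hcell : cellOf M (encP M p).toNat = p := by
      obtain ⟨a1, a2, a3, a4⟩ := (pyIsSafe_iff ..).mp hv
      exact cellOf_enc M p a1 a3 a4
    rw [if_pos ⟨hb1, hb2, by rw [hcell]; exact hnw⟩, hcell]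
    exact List.mem_map_of_mem hq

theorem none_not_mem_graphNbrs (g : PySem.Dict Int (List Int)) (u : Option Int) :
    none ∉ graphNbrs g u := by
  match u with
  | none => simp [graphNbrs]
  | some k => simp [graphNbrs]

theorem reachB2A (X : List (List Int)) (N M : Nat) (G : PySem.Dict Int (List Int))
    (hchar : gcharP X N M G) :
    ∀ p u, Relation.ReflTransGen
        (fun a b => b ∈ nbrB X (N : Int) (M : Int) a ∧ keepB X b = true) p u →
      pyIsSafe p.1 p.2 (N : Int) (M : Int) = true → cellXij X p.1 p.2 ≠ 1 →
      Relation.ReflTransGen (fun a b => b ∈ graphNbrs G a ∧ (fun _ => true) b = true)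
          (some (encP M p)) (some (encP M u))
        ∧ pyIsSafe u.1 u.2 (N : Int) (M : Int) = true ∧ cellXij X u.1 u.2 ≠ 1 := by
  intro p u hreach
  induction hreach using Relation.ReflTransGen.head_induction_on with
  | refl => intro hv hw; exact ⟨Relation.ReflTransGen.refl, hv, hw⟩
  | head hstep htail ih =>
      rename_i a b
      intro hv hw
      have hbv : pyIsSafe b.1 b.2 (N : Int) (M : Int) = true :=
        mem_nbrB_valid X (N : Int) (M : Int) a b hstep.1
      have hbw : cellXij X b.1 b.2 ≠ 1 := by
        have h := hstep.2; simp only [keepB, decide_eq_true_eq] at h; exact h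
      obtain ⟨hr, hu1, hu2⟩ := ih hbv hbw
      refine ⟨Relation.ReflTransGen.head ⟨?_, rfl⟩ hr, hu1, hu2⟩
      rw [mem_graphNbrs_iff X N M G hchar]
      exact ⟨a, b, rfl, rfl, hv, hw, hstep.1⟩

theorem reachA2B (X : List (List Int)) (N M : Nat) (G : PySem.Dict Int (List Int))
    (hchar : gcharP X N M G) (ps : Int × Int)
    (hpv : pyIsSafe ps.1 ps.2 (N : Int) (M : Int) = true) :
    ∀ w, Relation.ReflTransGen (fun a b => b ∈ graphNbrs G a ∧ (fun _ => true) b = true)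
        (some (encP M ps)) w →
      ∀ u, w = some (encP M u) → pyIsSafe u.1 u.2 (N : Int) (M : Int) = true →
        cellXij X u.1 u.2 ≠ 1 →
        Relation.ReflTransGen
          (fun a b => b ∈ nbrB X (N : Int) (M : Int) a ∧ keepB X b = true) ps u := by
  intro w hreach
  induction hreach with
  | refl =>
      intro u hu huv _
      have : encP M ps = encP M u := by injection hu
      have : ps = u := encP_inj N M ps u hpv huv this
      rw [← this]
  | tail hab hbc ih =>
      rename_i b c
      intro u hu huv hunw
      obtain ⟨p', q, hb, hc, hp'v, hp'w, hqmem⟩ :=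
        (mem_graphNbrs_iff X N M G hchar b c).mp hbc.1
      have hqv : pyIsSafe q.1 q.2 (N : Int) (M : Int) = true :=
        mem_nbrB_valid X (N : Int) (M : Int) p' q hqmem
      have huq : u = q := by
        rw [hu] at hc
        have : encP M u = encP M q := by injection hc
        exact encP_inj N M u q huv hqv this
      have hrB : Relation.ReflTransGen
          (fun a b => b ∈ nbrB X (N : Int) (M : Int) a ∧ keepB X b = true) ps p' :=
        ih p' hb hp'v hp'w
      refine Relation.ReflTransGen.tail hrB ⟨by rw [huq]; exact hqmem, ?_⟩
      simp only [keepB, decide_eq_true_eq]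
      exact hunw

theorem exists_iff_AB (X : List (List Int)) (N M : Nat) (G : PySem.Dict Int (List Int))
    (hchar : gcharP X N M G) (ps pd : Int × Int)
    (hpsv : pyIsSafe ps.1 ps.2 (N : Int) (M : Int) = true)
    (hpsw : cellXij X ps.1 ps.2 ≠ 1)
    (hpdv : pyIsSafe pd.1 pd.2 (N : Int) (M : Int) = true) :
    (∃ u, Relation.ReflTransGen (fun a b => b ∈ graphNbrs G a ∧ (fun _ => true) b = true)
        (some (encP M ps)) u ∧ some (encP M pd) ∈ graphNbrs G u)
    ↔ (∃ u, Relation.ReflTransGen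
        (fun a b => b ∈ nbrB X (N : Int) (M : Int) a ∧ keepB X b = true) ps u
        ∧ pd ∈ nbrB X (N : Int) (M : Int) u) := by
  constructor
  · rintro ⟨w, hr, hd⟩
    obtain ⟨p', q, hw, hdq, hp'v, hp'w, hqmem⟩ := (mem_graphNbrs_iff X N M G hchar w _).mp hd
    have hqv : pyIsSafe q.1 q.2 (N : Int) (M : Int) = true :=
      mem_nbrB_valid X (N : Int) (M : Int) p' q hqmem
    have hqpd : q = pd := by
      have : encP M pd = encP M q := by injection hdq
      exact (encP_inj N M pd q hpdv hqv this).symm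
    refine ⟨p', reachA2B X N M G hchar ps hpsv w hr p' hw hp'v hp'w, hqpd ▸ hqmem⟩
  · rintro ⟨u, hr, hd⟩
    obtain ⟨hrA, huv, hunw⟩ := reachB2A X N M G hchar ps u hr hpsv hpsw
    refine ⟨some (encP M u), hrA, ?_⟩
    rw [mem_graphNbrs_iff X N M G hchar]
    exact ⟨u, pd, rfl, rfl, huv, hunw, hd⟩

theorem bfsLoopA_nil (g : PySem.Dict Int (List Int)) (d : Option Int) :
    ∀ (f : Nat) (vis : PySem.Dict (Option Int) Bool), bfsLoopA g d f [] vis = false := by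
  intro f vis; cases f <;> rfl

theorem foldl_lastP {α β : Type} (P : α → Prop) [DecidablePred P] (g : α → β) (p : β) :
    ∀ (l : List α) (a : Option β),
      l.foldl (fun acc t => if P t then some (g t) else acc) a = some p →
      a = some p ∨ ∃ t ∈ l, p = g t ∧ P t := by
  intro l
  induction l with
  | nil => intro a h; exact Or.inl h
  | cons x xs ih =>
      intro a h
      rcases ih _ h with h' | ⟨t, ht, rfl, hP⟩
      · simp only at h'
        by_cases hx : P x
        · rw [if_pos hx] at h'
          right
          exact ⟨x, List.mem_cons_self .., (Option.some_inj.mp h').symm, hx⟩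
        · rw [if_neg hx] at h'
          exact Or.inl h'
      · exact Or.inr ⟨t, List.mem_cons_of_mem _ ht, rfl, hP⟩

theorem lastWith_some (X : List (List Int)) (M : Nat) (v : Int) (c : Nat) (p : Int × Int)
    (h : lastWith X M v c = some p) :
    (∃ t, t < c ∧ p = cellOf M t) ∧ cellXij X p.1 p.2 = v := by
  rcases foldl_lastP (fun t => cellXij X (cellOf M t).1 (cellOf M t).2 = v)
      (cellOf M) p (List.range c) none h with h' | ⟨t, ht, rfl, hP⟩
  · exact absurd h' (by simp)
  · exact ⟨⟨t, List.mem_range.mp ht, rfl⟩, hP⟩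

theorem GBFS_A_iff (X : List (List Int)) (N M : Nat) (G : PySem.Dict Int (List Int))
    (hchar : gcharP X N M G) (dst s0 : Option Int) :
    (GBFS memfA addfA (fun _ => true) dst (graphNbrs G) (N*M+2) [s0]
        ((PySem.Dict.empty).insert s0 true) = true)
    ↔ ∃ u, Relation.ReflTransGen
        (fun a b => b ∈ graphNbrs G a ∧ (fun _ => true) b = true) s0 u
        ∧ dst ∈ graphNbrs G u := by
  have hU : ∀ u v, v ∈ graphNbrs G u → (fun _ : Option Int => true) v = true →
      v ∈ insert none ((Finset.range (N*M)).image (fun c => some ((c : Nat) : Int))) := by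
    intro u v hv _
    obtain ⟨p, q, _, rfl, _, _, hq⟩ := (mem_graphNbrs_iff X N M G hchar u v).mp hv
    have hqv := mem_nbrB_valid X (N : Int) (M : Int) p q hq
    obtain ⟨hb1, hb2⟩ := enc_bounds N M q hqv
    refine Finset.mem_insert.mpr (Or.inr (Finset.mem_image.mpr ⟨(encP M q).toNat, ?_, ?_⟩))
    · exact Finset.mem_range.mpr (by omega)
    · congr 1; omega
  have hmem : ∀ v, memfA ((PySem.Dict.empty).insert s0 true) v = true
      ↔ v ∈ ({s0} : Finset (Option Int)) := by
    intro v
    by_cases h : v = s0 <;>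
      simp [memfA, PySem.Dict.getD_insert, PySem.Dict.getD_empty, h]
  have hcard : (insert none ((Finset.range (N*M)).image
      (fun c => some ((c : Nat) : Int)))).card ≤ N*M + 1 := by
    refine le_trans (Finset.card_insert_le _ _) ?_
    have := Finset.card_image_le (s := Finset.range (N*M))
      (f := fun c => some ((c : Nat) : Int))
    simp only [Finset.card_range] at this
    omega
  have hfuel : ([s0] : List (Option Int)).length
      + ((insert none ((Finset.range (N*M)).image (fun c => some ((c : Nat) : Int))))
          \ ({s0} : Finset (Option Int))).card ≤ N*M + 2 := by
    have := Finset.card_le_card (Finset.sdiff_subset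
      (s := insert none ((Finset.range (N*M)).image (fun c => some ((c : Nat) : Int))))
      (t := ({s0} : Finset (Option Int))))
    simp only [List.length_singleton]
    omega
  have hinv : ∀ v, memfA ((PySem.Dict.empty).insert s0 true) v = true →
      v ∉ ([s0] : List (Option Int)) → dst ∉ graphNbrs G v ∧
        ∀ z ∈ graphNbrs G v, (fun _ : Option Int => true) z = true →
          memfA ((PySem.Dict.empty).insert s0 true) z = true := by
    intro v hv hnq
    exfalso
    apply hnq
    have := (hmem v).mp hv
    simp only [Finset.mem_singleton] at this
    simp [this]
  have hq : ∀ v ∈ ([s0] : List (Option Int)),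
      memfA ((PySem.Dict.empty).insert s0 true) v = true := by
    intro v hv
    simp only [List.mem_singleton] at hv
    rw [hmem v]
    simp [hv]
  have := GBFS_iff memfA addfA (fun _ => true) dst (graphNbrs G) hmaA
    (insert none ((Finset.range (N*M)).image (fun c => some ((c : Nat) : Int)))) hU
    (N*M+2) [s0] ((PySem.Dict.empty).insert s0 true) ({s0} : Finset (Option Int))
    hmem hfuel hinv hq
  rw [this]
  simp

theorem GBFS_B_iff (X : List (List Int)) (N M : Nat) (dst s0 : Int × Int) :
    (GBFS memfB PySem.Set.add (keepB X) dst (nbrB X (N : Int) (M : Int)) (N*M+2) [s0]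
        (PySem.Set.add PySem.Set.empty s0) = true)
    ↔ ∃ u, Relation.ReflTransGen
        (fun a b => b ∈ nbrB X (N : Int) (M : Int) a ∧ keepB X b = true) s0 u
        ∧ dst ∈ nbrB X (N : Int) (M : Int) u := by
  have hU : ∀ u v, v ∈ nbrB X (N : Int) (M : Int) u → keepB X v = true →
      v ∈ (Finset.range N ×ˢ Finset.range M).image
        (fun q : Nat × Nat => ((q.1 : Int), (q.2 : Int))) := by
    intro u v hv _
    obtain ⟨h1, h2, h3, h4⟩ := (pyIsSafe_iff ..).mp (mem_nbrB_valid X _ _ u v hv)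
    refine Finset.mem_image.mpr ⟨(v.1.toNat, v.2.toNat), ?_, ?_⟩
    · rw [Finset.mem_product]
      exact ⟨Finset.mem_range.mpr (by omega), Finset.mem_range.mpr (by omega)⟩
    · rw [Prod.ext_iff]
      constructor <;> simp <;> omega
  have hmem : ∀ v, memfB (PySem.Set.add PySem.Set.empty s0) v = true
      ↔ v ∈ ({s0} : Finset (Int × Int)) := by
    intro v
    simp [memfB, PySem.Set.add, PySem.Set.empty, PySem.Set.contains]
  have hcard : ((Finset.range N ×ˢ Finset.range M).image
      (fun q : Nat × Nat => ((q.1 : Int), (q.2 : Int)))).card ≤ N*M := by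
    refine le_trans (Finset.card_image_le) ?_
    rw [Finset.card_product]
    simp
  have hfuel : ([s0] : List (Int × Int)).length
      + (((Finset.range N ×ˢ Finset.range M).image
          (fun q : Nat × Nat => ((q.1 : Int), (q.2 : Int))))
          \ ({s0} : Finset (Int × Int))).card ≤ N*M + 2 := by
    have := Finset.card_le_card (Finset.sdiff_subset
      (s := (Finset.range N ×ˢ Finset.range M).image
        (fun q : Nat × Nat => ((q.1 : Int), (q.2 : Int))))
      (t := ({s0} : Finset (Int × Int))))
    simp only [List.length_singleton]
    omega
  have hinv : ∀ v, memfB (PySem.Set.add PySem.Set.empty s0) v = true →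
      v ∉ ([s0] : List (Int × Int)) → dst ∉ nbrB X (N : Int) (M : Int) v ∧
        ∀ z ∈ nbrB X (N : Int) (M : Int) v, keepB X z = true →
          memfB (PySem.Set.add PySem.Set.empty s0) z = true := by
    intro v hv hnq
    exfalso
    apply hnq
    have := (hmem v).mp hv
    simp only [Finset.mem_singleton] at this
    simp [this]
  have hq : ∀ v ∈ ([s0] : List (Int × Int)),
      memfB (PySem.Set.add PySem.Set.empty s0) v = true := by
    intro v hv
    simp only [List.mem_singleton] at hv
    rw [hmem v]
    simp [hv]
  have := GBFS_iff memfB PySem.Set.add (keepB X) dst (nbrB X (N : Int) (M : Int)) hmaB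
    ((Finset.range N ×ˢ Finset.range M).image
      (fun q : Nat × Nat => ((q.1 : Int), (q.2 : Int)))) hU
    (N*M+2) [s0] (PySem.Set.add PySem.Set.empty s0) ({s0} : Finset (Int × Int))
    hmem hfuel hinv hq
  rw [this]
  simp

theorem existpath_eq_alt (X : List (List Int)) : existpath X = existpath_alt X := by
  obtain ⟨G, hfold, hchar'⟩ :=
    build_char X (X.length) (((PySem.List.pyGet? X 0).getD []).length)
  have hchar : gcharP X (X.length) (((PySem.List.pyGet? X 0).getD []).length) G := hchar'
  set N := X.length with hN
  set M := ((PySem.List.pyGet? X 0).getD []).length with hM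
  have hA : existpath X
      = bfsA G ((lastWith X M 2 (N*M)).map (encP M)) ((lastWith X M 3 (N*M)).map (encP M))
          (N*M + 2) := by
    unfold existpath
    simp only [PySem.List.len_eq]
    rw [hfold]
  have hBsc : scanB X (N : Int) (M : Int)
      = (lastWith X M 2 (N*M), lastWith X M 3 (N*M)) := scanB_char X N M
  have hBun : existpath_alt X
      = (if lastWith X M 2 (N*M) = lastWith X M 3 (N*M) then true
         else match lastWith X M 2 (N*M), lastWith X M 3 (N*M) with
           | some s, some d =>
              bfsLoopB X (N : Int) (M : Int) d (N*M + 2) [s] (PySem.Set.add PySem.Set.empty s)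
           | _, _ => false) := by
    unfold existpath_alt
    simp only [PySem.List.len_eq]
    rw [hBsc]
  cases h2 : lastWith X M 2 (N*M) with
  | none =>
      cases h3 : lastWith X M 3 (N*M) with
      | none =>
          rw [hA, hBun, h2, h3]
          rfl
      | some pd =>
          rw [hA, hBun, h2, h3]
          simp only [Option.map_none, Option.map_some]
          rw [if_neg (by simp)]
          show bfsA G none (some (encP M pd)) (N*M + 2) = false
          unfold bfsA
          rw [if_neg (by simp)]
          show bfsLoopA G (some (encP M pd)) (N*M+1+1) [none]
              ((PySem.Dict.empty).insert none true) = false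
          rw [show bfsLoopA G (some (encP M pd)) (N*M+1+1) [none]
                ((PySem.Dict.empty).insert none true)
              = bfsLoopA G (some (encP M pd)) (N*M+1) []
                ((PySem.Dict.empty).insert none true) from rfl]
          exact bfsLoopA_nil G _ _ _
  | some ps =>
      obtain ⟨⟨t2, ht2, hps⟩, hcell2⟩ := lastWith_some X M 2 (N*M) ps h2
      have hpsv : pyIsSafe ps.1 ps.2 (N : Int) (M : Int) = true := by
        rw [hps]; exact cellOf_valid N M t2 ht2
      have hpsw : cellXij X ps.1 ps.2 ≠ 1 := by rw [hcell2]; omega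
      cases h3 : lastWith X M 3 (N*M) with
      | none =>
          rw [hA, hBun, h2, h3]
          simp only [Option.map_none, Option.map_some]
          rw [if_neg (by simp)]
          show bfsA G (some (encP M ps)) none (N*M + 2) = false
          unfold bfsA
          rw [if_neg (by simp)]
          rw [bfsLoopA_eq]
          rw [Bool.eq_false_iff]
          intro htrue
          obtain ⟨u, _, hmem⟩ := (GBFS_A_iff X N M G hchar none (some (encP M ps))).mp htrue
          exact none_not_mem_graphNbrs G u hmem
      | some pd =>
          obtain ⟨⟨t3, ht3, hpd⟩, hcell3⟩ := lastWith_some X M 3 (N*M) pd h3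
          have hpdv : pyIsSafe pd.1 pd.2 (N : Int) (M : Int) = true := by
            rw [hpd]; exact cellOf_valid N M t3 ht3
          have hne : ps ≠ pd := by
            intro h
            rw [h, hcell3] at hcell2
            omega
          have hkne : encP M ps ≠ encP M pd := fun h => hne (encP_inj N M ps pd hpsv hpdv h)
          rw [hA, hBun, h2, h3]
          simp only [Option.map_some]
          rw [if_neg (by simp [hne])]
          show bfsA G (some (encP M ps)) (some (encP M pd)) (N*M + 2)
            = bfsLoopB X (N : Int) (M : Int) pd (N*M + 2) [ps] (PySem.Set.add PySem.Set.empty ps)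
          unfold bfsA
          rw [if_neg (by simp [hkne])]
          rw [bfsLoopA_eq, bfsLoopB_eq]
          rw [Bool.eq_iff_iff]
          rw [GBFS_A_iff X N M G hchar (some (encP M pd)) (some (encP M ps)),
            GBFS_B_iff X N M pd ps]
          exact exists_iff_AB X N M G hchar ps pd hpsv hpsw hpdv

-- ===== VERDICT (by name: the statement is the Claim_ definition above) =====
theorem existpath_spec : Claim_equal_existpath := by
  unfold Claim_equal_existpath
  intro X _hdom _hpre
  unfold Spec_existpath
  exact existpath_eq_alt X
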